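-- pv_equiv track=rewrite | github.com/DawidDebkowski/sieciowe-graf | ramkowanie/together.py | add_bit_stuffing
-- ===== SOURCE A (Python) =====
-- def add_bit_stuffing(message):
--     """
--     Adds bit stuffing to a message.
--     """
--     stuffed_message = ''
--     count = 0
--     for bit in message:
--         if bit == '1':
--             count += 1
--             stuffed_message += bit
--             if count == 5:
--                 stuffed_message += '0'  # Add a 0 after five consecutive 1s
--                 count = 0
--         else:
--             stuffed_message += bit
--             count = 0
--     return stuffed_message
-- ===== SOURCE B (Python) =====
-- def add_bit_stuffing(message):
--     """
--     Adds bit stuffing to a message.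
--     """
--     out = []
--     i = 0
--     n = len(message)
--     while i < n:
--         ch = message[i]
--         j = i + 1
--         while j < n and message[j] == ch:
--             j += 1
--         run_len = j - i
--         if ch == '1':
--             out.append('111110' * (run_len // 5) + '1' * (run_len % 5))
--         else:
--             out.append(ch * run_len)
--         i = j
--     return ''.join(out)
-- ===== Notes on version B (the rewrite author's own statement) =====
-- stated objective: alternative
-- what changed: Replaces the per-character counter loop by a run scanner: the message is split into maximal runs of equal characters, each run of ones is stuffed by arithmetic on its length (the five-ones-plus-zero block repeated L//5 times followed by the L%5 remaining ones), and every other run is copied verbatim.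
import Mathlib
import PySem

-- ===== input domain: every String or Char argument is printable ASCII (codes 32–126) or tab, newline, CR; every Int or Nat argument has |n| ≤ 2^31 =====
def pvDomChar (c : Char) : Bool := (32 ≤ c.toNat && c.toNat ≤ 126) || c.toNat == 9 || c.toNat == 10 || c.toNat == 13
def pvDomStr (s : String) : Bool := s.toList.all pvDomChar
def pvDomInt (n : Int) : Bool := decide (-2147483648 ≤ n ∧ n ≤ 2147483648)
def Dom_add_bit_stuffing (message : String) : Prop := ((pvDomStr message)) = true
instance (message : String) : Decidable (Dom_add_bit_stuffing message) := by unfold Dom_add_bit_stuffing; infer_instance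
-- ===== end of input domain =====

-- B replaces A's per-character counter loop by a maximal-run scanner with arithmetic on run lengths (objective: alternative, same cost).

-- ===== PORT A =====
-- A's loop: state (stuffed_message, count); after a '1' increment count, append the bit,
-- and when count hits 5 append '0' and reset; any other char is appended and resets count.
def add_bit_stuffing (message : String) : String :=
  String.mk (message.toList.foldl
    (fun (st : List Char × Nat) bit =>
      if bit = '1' then
        let count := st.2 + 1
        let s := st.1 ++ [bit]
        if count = 5 then (s ++ ['0'], 0) else (s, count)
      else (st.1 ++ [bit], 0))
    ([], 0)).1

-- ===== PORT B =====
-- one maximal run: for '1' runs, '111110' repeated L/5 then '1' repeated L%5; otherwise the run verbatim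
def stuffRun (ch : Char) (L : Nat) : List Char :=
  if ch = '1' then
    (List.replicate (L / 5) (['1','1','1','1','1','0'])).flatten ++ List.replicate (L % 5) '1'
  else List.replicate L ch

def bGo : List Char → List Char
  | [] => []
  | ch :: rest =>
    stuffRun ch ((rest.takeWhile (· = ch)).length + 1) ++ bGo (rest.dropWhile (· = ch))
termination_by l => l.length
decreasing_by
  simpa using Nat.lt_succ_of_le (List.length_dropWhile_le _ _)

def add_bit_stuffing_alt (message : String) : String :=
  String.mk (bGo message.toList)

-- ===== PRECONDITION & SPEC =====
def Spec_add_bit_stuffing (message : String) (out : String) : Prop := out = add_bit_stuffing_alt message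
instance (message : String) (out : String) : Decidable (Spec_add_bit_stuffing message out) := by unfold Spec_add_bit_stuffing; infer_instance

-- ===== CLAIM (what is proved, stated in full; the proofs are below) =====
def Claim_equal_add_bit_stuffing : Prop := ∀ (message : String), Dom_add_bit_stuffing message → Spec_add_bit_stuffing message (add_bit_stuffing message)

-- ===== LEMMAS AND PROOFS =====

-- A's loop as plain recursion on (count, remaining input), producing only the output suffix
def aGo : Nat → List Char → List Char
  | _, [] => []
  | c, b :: rest =>
    if b = '1' then
      (if c + 1 = 5 then '1' :: '0' :: aGo 0 rest else '1' :: aGo (c + 1) rest)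
    else b :: aGo 0 rest

lemma foldA_eq_aGo : ∀ (l : List Char) (acc : List Char) (c : Nat),
    (l.foldl (fun (st : List Char × Nat) bit =>
      if bit = '1' then
        let count := st.2 + 1
        let s := st.1 ++ [bit]
        if count = 5 then (s ++ ['0'], 0) else (s, count)
      else (st.1 ++ [bit], 0)) (acc, c)).1 = acc ++ aGo c l := by
  intro l
  induction l with
  | nil => intro acc c; simp [aGo]
  | cons b rest ih =>
    intro acc c
    by_cases hb : b = '1'
    · by_cases hc : c + 1 = 5
      · have hc4 : c = 4 := by omega
        subst hc4
        have h := ih (acc ++ ['1', '0']) 0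
        simp [List.foldl_cons, hb, aGo] at h ⊢
        exact h
      · have hc4 : c ≠ 4 := by omega
        have h := ih (acc ++ ['1']) (c + 1)
        simp [List.foldl_cons, hb, hc, hc4, aGo] at h ⊢
        exact h
    · have h := ih (acc ++ [b]) 0
      simp [List.foldl_cons, hb, aGo] at h ⊢
      exact h

-- output pattern of A over k consecutive '1's starting at count c
def onesOut : Nat → Nat → List Char
  | _, 0 => []
  | c, Nat.succ k => if c + 1 = 5 then '1' :: '0' :: onesOut 0 k else '1' :: onesOut (c + 1) k

lemma aGo_ones : ∀ (k c : Nat) (d : List Char), c < 5 →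
    (d = [] ∨ ∃ x xs, d = x :: xs ∧ x ≠ '1') →
    aGo c (List.replicate k '1' ++ d) = onesOut c k ++ aGo 0 d := by
  intro k
  induction k with
  | zero =>
    intro c d _ hd
    rcases hd with rfl | ⟨x, xs, rfl, hx⟩
    · simp [aGo, onesOut]
    · simp [aGo, onesOut, hx]
  | succ k ih =>
    intro c d hc hd
    by_cases h5 : c + 1 = 5
    · simp [List.replicate_succ, aGo, onesOut, h5, ih 0 d (by omega) hd]
    · simp [List.replicate_succ, aGo, onesOut, h5, ih (c + 1) d (by omega) hd]

lemma onesOut_spec : ∀ k, onesOut 0 k =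
    (List.replicate (k / 5) (['1','1','1','1','1','0'])).flatten ++ List.replicate (k % 5) '1' := by
  intro k
  induction k using Nat.strong_induction_on with
  | _ k ih =>
    by_cases hk : k < 5
    · interval_cases k <;> decide
    · obtain ⟨m, rfl⟩ : ∃ m, k = m + 5 := ⟨k - 5, by omega⟩
      have h1 : (m + 5) / 5 = m / 5 + 1 := by omega
      have h2 : (m + 5) % 5 = m % 5 := by omega
      have : onesOut 0 (m + 5) = '1' :: '1' :: '1' :: '1' :: '1' :: '0' :: onesOut 0 m := by
        show onesOut 0 (m + 1 + 1 + 1 + 1 + 1) = _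
        simp [onesOut]
      rw [this, ih m (by omega), h1, h2, List.replicate_succ, List.flatten_cons]
      simp

-- A over a run of non-'1' characters just copies them with count reset to 0
lemma aGo_copy : ∀ (t : List Char), (∀ x ∈ t, x ≠ '1') → ∀ d, aGo 0 (t ++ d) = t ++ aGo 0 d := by
  intro t
  induction t with
  | nil => intro _ d; simp
  | cons x t ih =>
    intro h d
    have hx : x ≠ '1' := h x (List.mem_cons_self)
    simp [aGo, hx, ih (fun y hy => h y (List.mem_cons_of_mem _ hy)) d]

lemma dropWhile_head (p : Char → Bool) : ∀ (l : List Char),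
    l.dropWhile p = [] ∨ ∃ x xs, l.dropWhile p = x :: xs ∧ p x = false := by
  intro l
  induction l with
  | nil => exact Or.inl rfl
  | cons a l ih =>
    by_cases h : p a
    · simpa [List.dropWhile, h] using ih
    · exact Or.inr ⟨a, l, by simp [List.dropWhile, h], by simpa using h⟩

lemma aGo_eq_bGo : ∀ (n : Nat) (l : List Char), l.length ≤ n → aGo 0 l = bGo l := by
  intro n
  induction n with
  | zero =>
    intro l hl
    have : l = [] := List.eq_nil_of_length_eq_zero (Nat.le_zero.1 hl)
    subst this; simp [aGo, bGo]
  | succ n ih =>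
    intro l hl
    match l with
    | [] => simp [aGo, bGo]
    | ch :: rest =>
      have hlen : (rest.dropWhile (· = ch)).length ≤ n := by
        have := List.length_dropWhile_le (· = ch) rest
        simp at hl; omega
      have hd : rest.dropWhile (· = ch) = [] ∨
          ∃ x xs, rest.dropWhile (· = ch) = x :: xs ∧ x ≠ ch := by
        rcases dropWhile_head (· = ch) rest with h | ⟨x, xs, hx, hpx⟩
        · exact Or.inl h
        · exact Or.inr ⟨x, xs, hx, by simpa using hpx⟩
      have htake : ∀ x ∈ rest.takeWhile (· = ch), x = ch := by
        intro x hx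
        simpa using List.mem_takeWhile_imp hx
      have hsplit : ch :: rest =
          (ch :: rest.takeWhile (· = ch)) ++ rest.dropWhile (· = ch) := by
        simp [List.takeWhile_append_dropWhile]
      by_cases hch : ch = '1'
      · subst hch
        have hrep : '1' :: rest.takeWhile (· = '1') =
            List.replicate ((rest.takeWhile (· = '1')).length + 1) '1' := by
          rw [List.replicate_succ]
          exact congrArg _ (List.eq_replicate_iff.2 ⟨rfl, htake⟩)
        have hd' : rest.dropWhile (· = '1') = [] ∨
            ∃ x xs, rest.dropWhile (· = '1') = x :: xs ∧ x ≠ '1' := hd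
        calc aGo 0 ('1' :: rest)
            = aGo 0 (List.replicate ((rest.takeWhile (· = '1')).length + 1) '1'
                ++ rest.dropWhile (· = '1')) := by rw [hsplit, hrep]
          _ = onesOut 0 ((rest.takeWhile (· = '1')).length + 1)
                ++ aGo 0 (rest.dropWhile (· = '1')) :=
              aGo_ones _ 0 _ (by omega) hd'
          _ = stuffRun '1' ((rest.takeWhile (· = '1')).length + 1)
                ++ bGo (rest.dropWhile (· = '1')) := by
              rw [onesOut_spec, ih _ hlen, stuffRun]; simp
          _ = bGo ('1' :: rest) := by rw [bGo]
      · have hneq : ∀ x ∈ ch :: rest.takeWhile (· = ch), x ≠ '1' := by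
          intro x hx
          rcases List.mem_cons.1 hx with rfl | hx'
          · exact hch
          · rw [htake x hx']; exact hch
        have hrep : stuffRun ch ((rest.takeWhile (· = ch)).length + 1) =
            ch :: rest.takeWhile (· = ch) := by
          rw [stuffRun, if_neg hch, List.replicate_succ]
          exact congrArg _ (List.eq_replicate_iff.2 ⟨rfl, htake⟩).symm
        calc aGo 0 (ch :: rest)
            = aGo 0 ((ch :: rest.takeWhile (· = ch)) ++ rest.dropWhile (· = ch)) := by
              rw [← hsplit]
          _ = (ch :: rest.takeWhile (· = ch)) ++ aGo 0 (rest.dropWhile (· = ch)) :=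
              aGo_copy _ hneq _
          _ = stuffRun ch ((rest.takeWhile (· = ch)).length + 1)
                ++ bGo (rest.dropWhile (· = ch)) := by rw [hrep, ih _ hlen]
          _ = bGo (ch :: rest) := by rw [bGo]

-- ===== VERDICT (by name: the statement is the Claim_ definition above) =====
theorem add_bit_stuffing_spec : Claim_equal_add_bit_stuffing := by
  intro message _
  unfold Spec_add_bit_stuffing add_bit_stuffing add_bit_stuffing_alt
  rw [foldA_eq_aGo, List.nil_append, aGo_eq_bGo message.toList.length _ le_rfl]
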